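-- pv_equiv track=rewrite | github.com/darksider-9/master-thesis-studio-skill | scripts/word_xml_core.py | split_base_for_script
-- ===== SOURCE A (Python) =====
-- def split_base_for_script(buffer: str) -> tuple[str, str]:
--     if not buffer:
--         return "", ""
--     end = len(buffer)
--     while end > 0 and buffer[end - 1].isspace():
--         end -= 1
--     trailing = buffer[end:]
--     if end == 0:
--         return buffer, ""
--     if buffer[end - 1] == "}":
--         depth = 0
--         for i in range(end - 1, -1, -1):
--             char = buffer[i]
--             if char == "}":
--                 depth += 1
--             elif char == "{":
--                 depth -= 1
--                 if depth == 0: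
--                     return buffer[:i] + trailing, buffer[i:end]
--     return buffer[: end - 1] + trailing, buffer[end - 1 : end]
-- ===== SOURCE B (Python) =====
-- def split_base_for_script(buffer: str) -> tuple[str, str]:
--     if not buffer:
--         return "", ""
--     end = len(buffer)
--     while end > 0 and buffer[end - 1].isspace():
--         end -= 1
--     trailing = buffer[end:]
--     if end == 0:
--         return buffer, ""
--     if buffer[end - 1] == "}":
--         # prefix-balance characterisation: the '{' matching the final '}' is the
--         # LAST position i with buffer[i] == '{' whose prefix balance equals the
--         # total balance of buffer[:end]; one forward pass each.
--         total = 0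
--         for ch in buffer[:end]:
--             if ch == "}":
--                 total += 1
--             elif ch == "{":
--                 total -= 1
--         best = None
--         bal = 0
--         for i in range(end):
--             ch = buffer[i]
--             if ch == "{" and bal == total:
--                 best = i
--             if ch == "}":
--                 bal += 1
--             elif ch == "{":
--                 bal -= 1
--         if best is not None:
--             return buffer[:best] + trailing, buffer[best:end]
--     return buffer[: end - 1] + trailing, buffer[end - 1 : end]
-- ===== Notes on version B (the rewrite author's own statement) =====
-- stated objective: alternative
-- what changed: Replaces A's backward scan with a running depth counter by a forward prefix-balance characterisation: the matching open brace is the last index whose prefix balance equals the total balance of the stripped buffer, found by two left-to-right passes.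
import Mathlib
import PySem

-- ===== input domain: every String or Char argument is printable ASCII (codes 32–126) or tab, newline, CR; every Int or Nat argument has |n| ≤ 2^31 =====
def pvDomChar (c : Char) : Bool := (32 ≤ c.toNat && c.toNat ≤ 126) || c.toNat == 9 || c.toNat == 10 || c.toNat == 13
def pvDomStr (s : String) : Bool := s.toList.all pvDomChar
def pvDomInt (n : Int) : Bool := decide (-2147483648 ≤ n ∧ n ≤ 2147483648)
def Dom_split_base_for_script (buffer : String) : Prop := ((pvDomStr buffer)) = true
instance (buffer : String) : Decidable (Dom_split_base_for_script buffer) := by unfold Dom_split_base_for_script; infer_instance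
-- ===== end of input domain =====

-- B replaces A's backward depth-counter scan by a forward prefix-balance pass (alternative algorithm, same cost).

-- ===== PORT A =====
-- shared by both ports: the identical `while end > 0 and buffer[end-1].isspace(): end -= 1` loop
def pvStripEnd (l : List Char) : Nat → Nat
  | 0 => 0
  | e + 1 => if PySem.Chars.isspace (l.getD e ' ') then pvStripEnd l e else e + 1

-- A's `for i in range(end-1,-1,-1)` loop with the running depth counter
def pvAScan (l : List Char) (i : Nat) (depth : Int) : Option Nat :=
  if l.getD i ' ' = '}' then
    match i with | 0 => none | j + 1 => pvAScan l j (depth + 1)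
  else if l.getD i ' ' = '{' then
    if depth - 1 = 0 then some i
    else match i with | 0 => none | j + 1 => pvAScan l j (depth - 1)
  else
    match i with | 0 => none | j + 1 => pvAScan l j depth

def split_base_for_script (buffer : String) : String × String :=
  if buffer = "" then ("", "") else
  let l := buffer.toList
  let e := pvStripEnd l l.length
  let trailing := l.drop e                       -- buffer[end:]
  if e = 0 then (buffer, "") else
  if l.getD (e - 1) ' ' = '}' then
    match pvAScan l (e - 1) 0 with
    | some i => (String.mk (l.take i ++ trailing), String.mk ((l.take e).drop i))
    | none => (String.mk (l.take (e - 1) ++ trailing), String.mk ((l.take e).drop (e - 1)))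
  else (String.mk (l.take (e - 1) ++ trailing), String.mk ((l.take e).drop (e - 1)))

-- ===== PORT B =====
-- the balance step shared by B's two forward passes
def pvBalStep (b : Int) (c : Char) : Int := if c = '}' then b + 1 else if c = '{' then b - 1 else b

def split_base_for_script_alt (buffer : String) : String × String :=
  if buffer = "" then ("", "") else
  let l := buffer.toList
  let e := pvStripEnd l l.length
  let trailing := l.drop e
  if e = 0 then (buffer, "") else
  let fallback := (String.mk (l.take (e - 1) ++ trailing), String.mk ((l.take e).drop (e - 1)))
  if l.getD (e - 1) ' ' = '}' then
    let total := (l.take e).foldl pvBalStep 0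
    let st := (List.range e).foldl (fun (s : Int × Option Nat) i =>
        let ch := l.getD i ' '
        let best := if ch = '{' ∧ s.1 = total then some i else s.2
        (pvBalStep s.1 ch, best)) (0, none)
    match st.2 with
    | some b => (String.mk (l.take b ++ trailing), String.mk ((l.take e).drop b))
    | none => fallback
  else fallback

-- ===== PRECONDITION & SPEC =====
def Spec_split_base_for_script (buffer : String) (out : String × String) : Prop := out = split_base_for_script_alt buffer
instance (buffer : String) (out : String × String) : Decidable (Spec_split_base_for_script buffer out) := by unfold Spec_split_base_for_script; infer_instance

-- ===== CLAIM (what is proved, stated in full; the proofs are below) =====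
def Claim_equal_split_base_for_script : Prop := ∀ (buffer : String), Dom_split_base_for_script buffer → Spec_split_base_for_script buffer (split_base_for_script buffer)

-- ===== LEMMAS AND PROOFS =====

-- prefix balance of the first k characters
def pvBal (l : List Char) (k : Nat) : Int := (l.take k).foldl pvBalStep 0

-- downward search for the last index ≤ i whose char is '{' and whose prefix balance is t
def pvFind (l : List Char) (t : Int) (i : Nat) : Option Nat :=
  if l.getD i ' ' = '{' ∧ pvBal l i = t then some i
  else match i with | 0 => none | j + 1 => pvFind l t j

theorem pvBal_succ (l : List Char) (k : Nat) :
    pvBal l (k + 1) = pvBalStep (pvBal l k) (l.getD k ' ') := by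
  unfold pvBal
  rw [List.take_succ, List.foldl_append]
  cases h : l[k]? with
  | none => simp [List.getD, h, pvBalStep]
  | some c => simp [List.getD, h]

theorem pvAScan_eq_find (l : List Char) :
    ∀ (i : Nat) (d : Int), pvAScan l i d = pvFind l (d + pvBal l (i + 1)) i := by
  intro i
  induction i with
  | zero =>
    intro d
    have h0 : pvBal l 0 = 0 := rfl
    have hb := pvBal_succ l 0
    unfold pvAScan pvFind
    by_cases h1 : l.getD 0 ' ' = '}'
    · rw [if_pos h1, if_neg (by rw [h1]; rintro ⟨h, -⟩; exact absurd h (by decide))]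
    · rw [if_neg h1]
      by_cases h2 : l.getD 0 ' ' = '{'
      · have hb1 : pvBal l (0 + 1) = -1 := by
          rw [hb, h2, h0, pvBalStep, if_neg (by decide), if_pos rfl]; decide
        rw [if_pos h2]
        by_cases hd : d - 1 = 0
        · rw [if_pos hd, if_pos ⟨h2, by rw [h0, hb1]; omega⟩]
        · rw [if_neg hd, if_neg (by rw [h0, hb1]; rintro ⟨-, h⟩; omega)]
      · rw [if_neg h2, if_neg (by rintro ⟨h, -⟩; exact h2 h)]
  | succ j ih =>
    intro d
    have hb := pvBal_succ l (j + 1)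
    unfold pvAScan pvFind
    by_cases h1 : l.getD (j + 1) ' ' = '}'
    · have hb1 : pvBal l (j + 1 + 1) = pvBal l (j + 1) + 1 := by
        rw [hb, h1, pvBalStep, if_pos rfl]
      rw [if_pos h1, if_neg (by rw [h1]; rintro ⟨h, -⟩; exact absurd h (by decide))]
      show pvAScan l j (d + 1) = pvFind l (d + pvBal l (j + 1 + 1)) j
      rw [ih (d + 1), hb1]
      congr 1
      ring
    · rw [if_neg h1]
      by_cases h2 : l.getD (j + 1) ' ' = '{'
      · have hb1 : pvBal l (j + 1 + 1) = pvBal l (j + 1) - 1 := by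
          rw [hb, h2, pvBalStep, if_neg (by decide), if_pos rfl]
        rw [if_pos h2]
        by_cases hd : d - 1 = 0
        · rw [if_pos hd, if_pos ⟨h2, by rw [hb1]; omega⟩]
        · rw [if_neg hd, if_neg (by rw [hb1]; rintro ⟨-, h⟩; omega)]
          show pvAScan l j (d - 1) = pvFind l (d + pvBal l (j + 1 + 1)) j
          rw [ih (d - 1), hb1]
          congr 1
          ring
      · have hb1 : pvBal l (j + 1 + 1) = pvBal l (j + 1) := by
          rw [hb, pvBalStep, if_neg h1, if_neg h2]
        rw [if_neg h2, if_neg (by rintro ⟨h, -⟩; exact h2 h)]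
        show pvAScan l j d = pvFind l (d + pvBal l (j + 1 + 1)) j
        rw [ih d, hb1]

theorem pvBFold_eq (l : List Char) (t : Int) :
    ∀ (k : Nat),
      (List.range k).foldl (fun (s : Int × Option Nat) i =>
        let ch := l.getD i ' '
        let best := if ch = '{' ∧ s.1 = t then some i else s.2
        (pvBalStep s.1 ch, best)) (0, none)
      = (pvBal l k, match k with | 0 => none | j + 1 => pvFind l t j) := by
  intro k
  induction k with
  | zero => simp [pvBal]
  | succ j ih =>
    rw [List.range_succ, List.foldl_append, ih]
    simp only [List.foldl_cons, List.foldl_nil]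
    rw [pvBal_succ l j]
    refine congrArg (Prod.mk _) ?_
    cases j <;> rfl

theorem pvBFold_eq' (l : List Char) (t : Int) (e : Nat) (he : e ≠ 0) :
    ((List.range e).foldl (fun (s : Int × Option Nat) i =>
        let ch := l.getD i ' '
        let best := if ch = '{' ∧ s.1 = t then some i else s.2
        (pvBalStep s.1 ch, best)) (0, none)).2
      = pvFind l t (e - 1) := by
  cases e with
  | zero => exact absurd rfl he
  | succ k => rw [pvBFold_eq]; rfl

-- ===== VERDICT (by name: the statement is the Claim_ definition above) =====
theorem split_base_for_script_spec : Claim_equal_split_base_for_script := by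
  intro buffer _
  unfold Spec_split_base_for_script split_base_for_script split_base_for_script_alt
  by_cases hempty : buffer = ""
  · simp [hempty]
  · simp only [if_neg hempty]
    set l := buffer.toList with hl
    set e := pvStripEnd l l.length with he
    by_cases he0 : e = 0
    · simp [he0]
    · simp only [if_neg he0]
      by_cases hbr : l.getD (e - 1) ' ' = '}'
      · simp only [if_pos hbr]
        have hE : e - 1 + 1 = e := by omega
        have hA : pvAScan l (e - 1) 0 = pvFind l ((l.take e).foldl pvBalStep 0) (e - 1) := by
          rw [pvAScan_eq_find, zero_add, hE]; rfl
        have hB := pvBFold_eq' l ((l.take e).foldl pvBalStep 0) e he0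
        rw [hA, hB]
      · simp only [if_neg hbr]
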